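-- pv_equiv track=rewrite | github.com/x-senpai-x/graphNim | solvers/g4.py | _find_m_for_k
-- ===== SOURCE A (Python) =====
-- import math
--
-- def _find_m_for_k(k: int) -> int:
--     """Find unique m ∈ N such that m(m+1)/2 ≤ k ≤ m(m+3)/2.
--
--     Implements constraint (4.1), arXiv:2509.05064v1.
--     """
--     # m(m+1)/2 ≤ k ≤ m(m+3)/2
--     # Solve m(m+1)/2 = k => m ≈ (-1 + sqrt(1+8k))/2
--     m = int((-1 + math.isqrt(1 + 8 * k)) / 2)
--     # Adjust if needed
--     while m >= 1 and m * (m + 1) // 2 > k: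
--         m -= 1
--     while (m + 1) * (m + 2) // 2 <= k:
--         m += 1
--     if m >= 1 and m * (m + 1) // 2 <= k <= m * (m + 3) // 2:
--         return m
--     return -1
-- ===== SOURCE B (Python) =====
-- def _find_m_for_k(k: int) -> int:
--     """Find unique m in N such that m(m+1)/2 <= k <= m(m+3)/2.
--
--     Binary search for the largest m with m(m+1)//2 <= k (no sqrt at all):
--     grow an upper bound by doubling, then bisect.
--     """
--     hi = 1
--     while hi * (hi + 1) // 2 <= k:
--         hi *= 2
--     lo = 0
--     while lo < hi:
--         mid = (lo + hi + 1) // 2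
--         if mid * (mid + 1) // 2 <= k:
--             lo = mid
--         else:
--             hi = mid - 1
--     m = lo
--     if m >= 1 and k <= m * (m + 3) // 2:
--         return m
--     return -1
-- ===== Notes on version B (the rewrite author's own statement) =====
-- stated objective: alternative
-- what changed: B abandons the sqrt-estimate-plus-correction approach entirely: it finds the largest m with m(m+1)//2 <= k by doubling an upper bound and then binary searching, using only integer comparisons (no isqrt, no float).
import Mathlib
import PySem

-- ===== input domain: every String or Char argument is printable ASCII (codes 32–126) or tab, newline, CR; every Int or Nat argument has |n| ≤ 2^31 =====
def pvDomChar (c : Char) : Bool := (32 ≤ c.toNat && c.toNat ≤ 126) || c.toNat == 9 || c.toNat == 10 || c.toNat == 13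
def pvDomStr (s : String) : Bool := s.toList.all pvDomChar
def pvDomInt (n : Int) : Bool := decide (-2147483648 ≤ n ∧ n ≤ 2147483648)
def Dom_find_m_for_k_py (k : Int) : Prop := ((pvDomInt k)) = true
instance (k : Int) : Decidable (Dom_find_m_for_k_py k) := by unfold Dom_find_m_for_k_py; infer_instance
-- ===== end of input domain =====

-- B replaces A's sqrt-estimate-plus-correction-loops by a doubling-then-binary-search
-- for the largest m with m(m+1)//2 ≤ k (objective: alternative; no isqrt or float at all).

-- ===== PORT A =====
-- first while-loop: decrement m while m >= 1 and m*(m+1)//2 > k (fuel is a totality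
-- guard only; m.toNat + 1 always suffices since m decreases by 1 each step)
def aLoopDown : Nat → Int → Int → Int
  | 0, m, _ => m
  | fuel + 1, m, k =>
      if m ≥ 1 ∧ PySem.Int.floordiv (m * (m + 1)) 2 > k then aLoopDown fuel (m - 1) k else m

-- second while-loop: increment m while (m+1)*(m+2)//2 <= k (fuel = totality guard;
-- k.toNat + 2 always suffices since the loop stops once (m+1)*(m+2)//2 > k)
def aLoopUp : Nat → Int → Int → Int
  | 0, m, _ => m
  | fuel + 1, m, k =>
      if PySem.Int.floordiv ((m + 1) * (m + 2)) 2 ≤ k then aLoopUp fuel (m + 1) k else m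

-- math.isqrt(1+8k) ported as Nat.sqrt of (1+8k).toNat (exact for 1+8k ≥ 0; Python
-- raises ValueError for 1+8k < 0, excluded by Pre_).  int((-1 + s)/2) : float true
-- division then truncation toward zero — for s ≥ 1 (true whenever k ≥ 0, i.e. on
-- Pre_) this equals floor division, ported as PySem.Int.floordiv.
def find_m_for_k_py (k : Int) : Int :=
  let s : Int := Int.ofNat (Nat.sqrt (1 + 8 * k).toNat)
  let m := PySem.Int.floordiv (-1 + s) 2
  let m := aLoopDown (m.toNat + 1) m k
  let m := aLoopUp (k.toNat + 2) m k
  if m ≥ 1 ∧ PySem.Int.floordiv (m * (m + 1)) 2 ≤ k ∧ k ≤ PySem.Int.floordiv (m * (m + 3)) 2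
  then m else -1

-- ===== PORT B =====
-- doubling loop: hi *= 2 while hi*(hi+1)//2 <= k (fuel = totality guard;
-- k.toNat + 2 always suffices since hi grows past k)
def bGrow : Nat → Int → Int → Int
  | 0, hi, _ => hi
  | fuel + 1, hi, k =>
      if PySem.Int.floordiv (hi * (hi + 1)) 2 ≤ k then bGrow fuel (hi * 2) k else hi

-- binary-search loop: while lo < hi bisect (fuel = totality guard; the gap hi - lo
-- strictly shrinks each step, so hi.toNat + 2 at entry with lo = 0 suffices)
def bSearch : Nat → Int → Int → Int → Int
  | 0, lo, _, _ => lo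
  | fuel + 1, lo, hi, k =>
      if lo < hi then
        let mid := PySem.Int.floordiv (lo + hi + 1) 2
        if PySem.Int.floordiv (mid * (mid + 1)) 2 ≤ k then bSearch fuel mid hi k
        else bSearch fuel lo (mid - 1) k
      else lo

def find_m_for_k_py_alt (k : Int) : Int :=
  let hi := bGrow (k.toNat + 2) 1 k
  let m := bSearch (hi.toNat + 2) 0 hi k
  if m ≥ 1 ∧ k ≤ PySem.Int.floordiv (m * (m + 3)) 2 then m else -1

-- ===== PRECONDITION & SPEC =====
-- Pre_ excludes exactly k < 0, where Python A raises ValueError (math.isqrt of a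
-- negative argument).
def Pre_find_m_for_k_py (k : Int) : Prop := 0 ≤ k
instance (k : Int) : Decidable (Pre_find_m_for_k_py k) := by unfold Pre_find_m_for_k_py; infer_instance

def pvWitness_find_m_for_k_py : Int := (7)

def Spec_find_m_for_k_py (k : Int) (out : Int) : Prop := out = find_m_for_k_py_alt k
instance (k : Int) (out : Int) : Decidable (Spec_find_m_for_k_py k out) := by unfold Spec_find_m_for_k_py; infer_instance

-- ===== CLAIM =====
def Claim_equal_find_m_for_k_py : Prop := ∀ (k : Int), Dom_find_m_for_k_py k → Pre_find_m_for_k_py k → Spec_find_m_for_k_py k (find_m_for_k_py k)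

-- ===== LEMMAS AND PROOFS =====

theorem pv_tri_eq (m : Int) : 2 * PySem.Int.floordiv (m * (m + 1)) 2 = m * (m + 1) := by
  rw [PySem.Int.floordiv_eq_ediv_of_pos (by omega)]
  have : 2 ∣ m * (m + 1) := (Int.even_mul_succ_self m).two_dvd
  omega

-- the sqrt estimate M = (s-1)/2 with s = Nat.sqrt (8K+1) brackets K
theorem pv_sqrt_bounds (K : Nat) :
    (Nat.sqrt (8 * K + 1) - 1) / 2 * ((Nat.sqrt (8 * K + 1) - 1) / 2 + 1) / 2 ≤ K ∧
    K < ((Nat.sqrt (8 * K + 1) - 1) / 2 + 1) * ((Nat.sqrt (8 * K + 1) - 1) / 2 + 2) / 2 := by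
  set s := Nat.sqrt (8 * K + 1) with hs
  have hs1 : 1 ≤ s := by
    have := Nat.sqrt_le_sqrt (show 1 ≤ 8 * K + 1 by omega)
    simpa [hs] using this
  set M := (s - 1) / 2 with hM
  have hlo : 2 * M + 1 ≤ s := by omega
  have hhi : s ≤ 2 * M + 2 := by omega
  have h1 : s * s ≤ 8 * K + 1 := by
    simpa [hs, pow_two] using Nat.sqrt_le' (8 * K + 1)
  have h2 : 8 * K + 1 < (s + 1) * (s + 1) := by
    simpa [hs, pow_two, Nat.succ_eq_add_one] using Nat.lt_succ_sqrt' (8 * K + 1)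
  have hA : (2 * M + 1) * (2 * M + 1) ≤ 8 * K + 1 :=
    le_trans (Nat.mul_le_mul hlo hlo) h1
  have hB : 8 * K + 1 < (2 * M + 3) * (2 * M + 3) :=
    lt_of_lt_of_le h2 (Nat.mul_le_mul (by omega) (by omega))
  have eA : (2 * M + 1) * (2 * M + 1) = 4 * (M * (M + 1)) + 1 := by ring
  have eB : (2 * M + 3) * (2 * M + 3) = 4 * ((M + 1) * (M + 2)) + 1 := by ring
  have dvd1 : 2 ∣ M * (M + 1) := (Nat.even_mul_succ_self M).two_dvd
  have dvd2 : 2 ∣ (M + 1) * (M + 2) := (Nat.even_mul_succ_self (M + 1)).two_dvd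
  omega

theorem pv_floordiv_nonneg (a : Int) (ha : 0 ≤ a) :
    PySem.Int.floordiv a 2 = ((a.toNat / 2 : Nat) : Int) := by
  have : a = ((a.toNat : Nat) : Int) := by omega
  rw [this]
  exact_mod_cast PySem.Int.floordiv_natCast a.toNat 2

-- bGrow correctness: if the invariant 1 ≤ hi holds and fuel ≥ k + 2 - hi (loosely:
-- enough), the result h satisfies 1 ≤ h and k < h*(h+1)//2·2 … we state exactly
-- what the proof needs: 1 ≤ result ∧ 2*k < result*(result+1)
theorem pv_bGrow_spec (fuel : Nat) (hi k : Int) (hhi : 1 ≤ hi)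
    (hfuel : k < hi + (fuel : Int)) :
    1 ≤ bGrow fuel hi k ∧ 2 * k < bGrow fuel hi k * (bGrow fuel hi k + 1) := by
  induction fuel generalizing hi with
  | zero =>
      simp only [bGrow]
      have h2 : hi * 2 ≤ hi * (hi + 1) :=
        mul_le_mul_of_nonneg_left (by omega) (by omega)
      exact ⟨hhi, by omega⟩
  | succ n ih =>
      simp only [bGrow]
      split_ifs with h
      · have htri := pv_tri_eq hi
        exact ih (hi * 2) (by omega) (by omega)
      · have htri := pv_tri_eq hi
        exact ⟨hhi, by omega⟩

-- bSearch correctness: with the invariant 0 ≤ lo ≤ hi, lo*(lo+1) ≤ 2k < (hi+1)*(hi+2)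
-- and fuel > hi - lo, the search converges to the unique m with m(m+1) ≤ 2k < (m+1)(m+2)
theorem pv_bSearch_spec (fuel : Nat) (lo hi k : Int) (h0 : 0 ≤ lo) (hle : lo ≤ hi)
    (hlo : lo * (lo + 1) ≤ 2 * k) (hhi : 2 * k < (hi + 1) * (hi + 2))
    (hfuel : hi - lo < (fuel : Int)) :
    bSearch fuel lo hi k * (bSearch fuel lo hi k + 1) ≤ 2 * k ∧
    2 * k < (bSearch fuel lo hi k + 1) * (bSearch fuel lo hi k + 2) := by
  induction fuel generalizing lo hi with
  | zero => omega
  | succ n ih =>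
      simp only [bSearch]
      split_ifs with h1 h2
      · -- mid*(mid+1)//2 ≤ k : lo := mid
        set mid := PySem.Int.floordiv (lo + hi + 1) 2 with hmid
        have hb := PySem.Int.floordiv_two_mid_bounds (lo := lo) (hi := hi + 1) (by omega)
        have hmid1 : lo + 1 ≤ mid ∧ mid ≤ hi := by
          constructor
          · rw [hmid, PySem.Int.floordiv_eq_ediv_of_pos (by omega)]
            rw [PySem.Int.floordiv_eq_ediv_of_pos (by omega)] at hb
            omega
          · rw [hmid, PySem.Int.floordiv_eq_ediv_of_pos (by omega)]
            rw [PySem.Int.floordiv_eq_ediv_of_pos (by omega)] at hb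
            omega
        have htri := pv_tri_eq mid
        exact ih mid hi (by omega) (by omega) (by omega) hhi (by omega)
      · -- else: hi := mid - 1
        set mid := PySem.Int.floordiv (lo + hi + 1) 2 with hmid
        have hb := PySem.Int.floordiv_two_mid_bounds (lo := lo) (hi := hi + 1) (by omega)
        have hmid1 : lo + 1 ≤ mid ∧ mid ≤ hi := by
          constructor
          · rw [hmid, PySem.Int.floordiv_eq_ediv_of_pos (by omega)]
            rw [PySem.Int.floordiv_eq_ediv_of_pos (by omega)] at hb
            omega
          · rw [hmid, PySem.Int.floordiv_eq_ediv_of_pos (by omega)]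
            rw [PySem.Int.floordiv_eq_ediv_of_pos (by omega)] at hb
            omega
        have htri := pv_tri_eq mid
        have : 2 * k < (mid - 1 + 1) * (mid - 1 + 2) := by nlinarith [htri]
        exact ih lo (mid - 1) h0 (by omega) hlo this (by omega)
      · -- lo = hi
        have hlohi : lo = hi := by omega
        subst hlohi
        exact ⟨hlo, hhi⟩

-- B computes the unique m ≥ 0 with m(m+1) ≤ 2k < (m+1)(m+2), then applies the final test
theorem pv_alt_char (k : Int) (hk : 0 ≤ k) :
    ∃ m : Int, 0 ≤ m ∧ m * (m + 1) ≤ 2 * k ∧ 2 * k < (m + 1) * (m + 2) ∧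
      find_m_for_k_py_alt k =
        (if m ≥ 1 ∧ k ≤ PySem.Int.floordiv (m * (m + 3)) 2 then m else -1) := by
  unfold find_m_for_k_py_alt
  set hi := bGrow (k.toNat + 2) 1 k with hhidef
  have hgrow := pv_bGrow_spec (k.toNat + 2) 1 k (by omega) (by push_cast; omega)
  rw [← hhidef] at hgrow
  set m := bSearch (hi.toNat + 2) 0 hi k with hmdef
  have hsearch := pv_bSearch_spec (hi.toNat + 2) 0 hi k (by omega) (by omega)
      (by omega) (by nlinarith [hgrow.1, hgrow.2]) (by push_cast; omega)
  rw [← hmdef] at hsearch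
  refine ⟨m, ?_, hsearch.1, hsearch.2, rfl⟩
  nlinarith [hsearch.2]

theorem find_m_for_k_py_spec : Claim_equal_find_m_for_k_py := by
  unfold Claim_equal_find_m_for_k_py
  intro k _ hk
  unfold Spec_find_m_for_k_py find_m_for_k_py
  simp only [Int.ofNat_eq_natCast]
  have hk' : (0:Int) ≤ k := hk
  set K : Nat := k.toNat with hK
  have hkK : k = (K : Int) := by omega
  set s : Nat := Nat.sqrt (8 * K + 1) with hsdef
  have hs1 : 1 ≤ s := by
    have := Nat.sqrt_le_sqrt (show 1 ≤ 8 * K + 1 by omega)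
    simpa [hsdef] using this
  have harg : (1 + 8 * k).toNat = 8 * K + 1 := by omega
  set M : Nat := (s - 1) / 2 with hMdef
  have hA0 : PySem.Int.floordiv (-1 + ((Nat.sqrt (1 + 8 * k).toNat : Nat) : Int)) 2 = (M : Int) := by
    rw [harg, ← hsdef]
    rw [pv_floordiv_nonneg _ (by omega)]
    congr 1
    omega
  obtain ⟨hlo, hhi⟩ := pv_sqrt_bounds K
  rw [← hsdef, ← hMdef] at hlo hhi
  -- the two correction loops do not fire at M
  have htriM : PySem.Int.floordiv ((M : Int) * ((M : Int) + 1)) 2 = ((M * (M + 1) / 2 : Nat) : Int) := by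
    rw [pv_floordiv_nonneg _ (by positivity)]
    congr 1
  have htriM1 : PySem.Int.floordiv (((M : Int) + 1) * ((M : Int) + 2)) 2
      = (((M + 1) * (M + 2) / 2 : Nat) : Int) := by
    rw [pv_floordiv_nonneg _ (by positivity)]
    congr 1
  have hdown : aLoopDown ((M : Int).toNat + 1) (M : Int) k = (M : Int) := by
    unfold aLoopDown
    rw [if_neg]
    rintro ⟨-, hgt⟩
    rw [htriM, hkK] at hgt
    exact absurd hlo (by exact_mod_cast not_le.mpr hgt)
  have hup : aLoopUp (K + 2) (M : Int) k = (M : Int) := by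
    unfold aLoopUp
    rw [if_neg]
    intro hle
    rw [htriM1, hkK] at hle
    exact absurd hhi (by exact_mod_cast not_lt.mpr hle)
  simp only [hA0, hdown, hup]
  -- A returns (if M ≥ 1 ∧ tri M ≤ k ∧ k ≤ M(M+3)//2 then M else -1); compare with B
  obtain ⟨m, hm0, hm1, hm2, hBeq⟩ := pv_alt_char k hk'
  -- M and m satisfy the same bracketing, hence are equal
  have hMb1 : (M : Int) * ((M : Int) + 1) ≤ 2 * k := by
    have htri := pv_tri_eq (M : Int)
    rw [htriM] at htri
    have hc : ((M * (M + 1) / 2 : Nat) : Int) ≤ (K : Int) := by exact_mod_cast hlo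
    rw [hkK]
    omega
  have hMb2 : 2 * k < ((M : Int) + 1) * ((M : Int) + 2) := by
    have htri := pv_tri_eq (((M : Int)) + 1)
    rw [show ((M : Int) + 1 + 1) = (M : Int) + 2 from by ring, htriM1] at htri
    have hc : (K : Int) < (((M + 1) * (M + 2) / 2 : Nat) : Int) := by exact_mod_cast hhi
    rw [hkK]
    omega
  have hMm : (M : Int) = m := by nlinarith [hm1, hm2, hMb1, hMb2, hm0, Int.natCast_nonneg M]
  rw [hBeq, ← hMm]
  -- A's extra conjunct tri M ≤ k is implied by hMb1
  have htriMk : PySem.Int.floordiv ((M : Int) * ((M : Int) + 1)) 2 ≤ k := by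
    have := pv_tri_eq (M : Int)
    omega
  by_cases h1 : (M : Int) ≥ 1 ∧ k ≤ PySem.Int.floordiv ((M : Int) * ((M : Int) + 3)) 2
  · rw [if_pos ⟨h1.1, htriMk, h1.2⟩, if_pos h1]
  · rw [if_neg, if_neg h1]
    rintro ⟨ha, -, hb⟩
    exact h1 ⟨ha, hb⟩

-- ===== VERDICT =====
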